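-- pv_equiv track=rewrite | github.com/ketchup-doraemon/Morophology_Team4 | src/get_prob.py | clustering_group
-- ===== SOURCE A (Python) =====
-- from copy import deepcopy
--
-- def clustering_group(pairs):
--     pair_list1 = [set(pair[0:2]) for pair in sum(list(pairs.values()),[])]
--     pair_list2 = deepcopy(pair_list1)
--     cluster_list = []
--     for pair1 in pair_list1[:]:
--         ald = False
--         for cluster in cluster_list:
--             if pair1 <= cluster:
--                 ald = True
--         if ald:
--             continue
--
--         while True:
--             calc = False
--             for pair2 in pair_list2[:]:
--                 if pair1 >= pair2:
--                     pass
--                 elif not pair1.isdisjoint(pair2):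
--                     pair1 = pair1 | pair2
--                     calc = True
--             if not calc:
--                 cluster_list.append(pair1)
--                 break
--
--     return cluster_list
-- ===== SOURCE B (Python) =====
-- def clustering_group(pairs):
--     edges = [p[0:2] for vs in pairs.values() for p in vs]
--     adj = {}
--     for e in edges:
--         for a in e:
--             adj.setdefault(a, []).extend(b for b in e if b != a)
--     components = []
--     visited = set()
--     for e in edges:
--         if e and e[0] not in visited:
--             comp = set()
--             stack = [e[0]]
--             while stack:
--                 x = stack.pop()
--                 if x not in comp:
--                     comp.add(x)
--                     stack.extend(adj[x])
--             visited |= comp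
--             components.append(comp)
--     return components
-- ===== Notes on version B (the rewrite author's own statement) =====
-- stated objective: faster
-- what changed: Replaces A's repeated full rescans of all pair-sets with subset tests against every emitted cluster (a fixpoint closure per output cluster) by a standard graph traversal: build an adjacency dict once, then emit each connected component via one DFS with a global visited set, in first-edge order.
-- intended difference: On inputs whose FIRST flattened pair is the empty list, A emits an empty set as the first cluster (an accident of its subset test against an empty cluster list; later empty pairs are silently dropped), while B never emits empty clusters because an empty pair connects no elements; dropping the empty cluster is the intended clustering behaviour. — e.g. on clustering_group([("k", [[]])]): A returns [[]], B returns []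
import Mathlib
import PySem

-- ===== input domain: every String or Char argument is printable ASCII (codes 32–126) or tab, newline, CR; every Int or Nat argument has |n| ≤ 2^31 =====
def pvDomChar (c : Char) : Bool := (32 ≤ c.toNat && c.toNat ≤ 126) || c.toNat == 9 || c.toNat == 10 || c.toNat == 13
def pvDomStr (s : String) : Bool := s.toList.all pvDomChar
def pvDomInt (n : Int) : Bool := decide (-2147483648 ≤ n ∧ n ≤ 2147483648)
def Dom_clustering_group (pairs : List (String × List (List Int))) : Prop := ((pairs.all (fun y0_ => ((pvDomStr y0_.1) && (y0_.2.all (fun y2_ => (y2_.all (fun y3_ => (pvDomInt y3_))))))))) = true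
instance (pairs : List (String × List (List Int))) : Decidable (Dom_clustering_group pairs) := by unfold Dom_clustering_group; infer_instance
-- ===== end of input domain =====

-- B replaces A's per-cluster fixpoint of repeated full rescans by one adjacency dict + one DFS per
-- component, emitted in first-edge order; objective: faster. Where the first flattened pair is
-- empty, A emits an empty cluster and B (intendedly) does not — stated as D_ below.
-- Python 'set[int]' values are represented canonically as strictly increasing lists (Python's
-- set iteration order is not semantically meaningful and outputs are compared as sets).


-- ---- shared representation of Python 'set[int]': strictly increasing list of its elements ----
def sinsert (x : Int) : List Int → List Int
  | [] => [x]
  | y :: t => if x < y then x :: y :: t else if x = y then y :: t else y :: sinsert x t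

-- set(l)
def sofList (l : List Int) : List Int := l.foldr sinsert []

-- s | t
def sunion (a b : List Int) : List Int := b.foldr sinsert a

-- s <= t  (issubset)
def ssubset (a b : List Int) : Bool := a.all (fun x => b.contains x)

-- s.isdisjoint(t)
def sdisjoint (a b : List Int) : Bool := a.all (fun x => !(b.contains x))

-- ===== PORT A =====
-- one pass of A's inner 'for pair2 in pair_list2[:]' loop, state = (pair1, calc)
def pvScanStep (s : List Int × Bool) (q : List Int) : List Int × Bool :=
  if ssubset q s.1 then s
  else if !(sdisjoint s.1 q) then (sunion s.1 q, true)
  else s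

def pvScan (p : List Int) (es : List (List Int)) : List Int × Bool :=
  es.foldl pvScanStep (p, false)

-- A's 'while True' closure loop; fuel makes it total (the caller passes enough, see lemmas)
def pvClose (fuel : Nat) (p : List Int) (es : List (List Int)) : List Int :=
  match fuel with
  | 0 => p
  | n + 1 =>
    let s := pvScan p es
    if s.2 then pvClose n s.1 es else s.1

def clustering_group (pairs : List (String × List (List Int))) : List (List Int) :=
  let pair_list1 := ((pairs.map (fun kv => kv.2)).flatten).map (fun p => sofList (p.take 2))
  let pair_list2 := pair_list1
  let fuel := (pair_list2.map List.length).sum + 1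
  pair_list1.foldl (fun cl p1 =>
    if cl.any (fun c => ssubset p1 c) then cl
    else cl ++ [pvClose fuel p1 pair_list2]) []

-- ===== PORT B =====
-- for a in e: adj.setdefault(a, []).extend(b for b in e if b != a)
def pvAdjStep (d : PySem.Dict Int (List Int)) (e : List Int) : PySem.Dict Int (List Int) :=
  e.foldl (fun d a => d.insert a (d.getD a [] ++ e.filter (fun b => b != a))) d

-- termination measure for the DFS: stack size + weight of the unvisited adjacency entries
def pvPot (adj : PySem.Dict Int (List Int)) (comp : List Int) : Nat :=
  ((adj.keys.filter (fun x => !(comp.contains x))).map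
    (fun x => ((adj.getD x []).length + 1))).sum

theorem mem_sinsert {y x : Int} {l : List Int} : y ∈ sinsert x l ↔ y = x ∨ y ∈ l := by
  induction l with
  | nil => simp [sinsert]
  | cons z t ih =>
    simp only [sinsert]
    split_ifs with h1 h2
    · simp
    · subst h2; simp
    · simp [ih]; tauto

theorem contains_sinsert {x y : Int} {comp : List Int} :
    ((sinsert x comp).contains y) = (y == x || comp.contains y) := by
  by_cases h : y = x <;> simp [List.contains_iff_mem, mem_sinsert, h]

theorem pot_filter_mono (l : List Int) (f : Int → Nat) (p q : Int → Bool)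
    (h : ∀ y, p y = true → q y = true) :
    ((l.filter p).map f).sum ≤ ((l.filter q).map f).sum := by
  induction l with
  | nil => simp
  | cons z t ih =>
    by_cases hp : p z = true
    · simp only [List.filter_cons, hp, h z hp, if_true, List.map_cons, List.sum_cons]
      omega
    · by_cases hq : q z = true <;>
        simp only [List.filter_cons, hp, hq, Bool.false_eq_true, if_true, if_false,
          List.map_cons, List.sum_cons] <;> omega

theorem pot_mono_sinsert (l : List Int) (f : Int → Nat) (comp : List Int) (x : Int) :
    ((l.filter (fun y => !((sinsert x comp).contains y))).map f).sum ≤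
      ((l.filter (fun y => !(comp.contains y))).map f).sum := by
  apply pot_filter_mono
  intro y hy
  simp only [contains_sinsert] at hy
  simp only [Bool.not_eq_true'] at hy ⊢
  rcases Bool.or_eq_false_iff.1 hy with ⟨_, h2⟩
  exact h2

theorem pot_sinsert (l : List Int) (f : Int → Nat) (comp : List Int) (x : Int)
    (hx : x ∈ l) (hxc : ¬ x ∈ comp) :
    ((l.filter (fun y => !((sinsert x comp).contains y))).map f).sum + f x ≤
      ((l.filter (fun y => !(comp.contains y))).map f).sum := by
  induction l with
  | nil => simp at hx
  | cons z t ih =>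
    by_cases hz : z = x
    · subst hz
      have h1 : ((sinsert z comp).contains z) = true := by
        simp [List.contains_iff_mem, mem_sinsert]
      have h2 : (comp.contains z) = false := by
        simp only [Bool.eq_false_iff, ne_eq, List.contains_iff_mem]; exact hxc
      simp only [List.filter_cons, h1, h2, Bool.not_true, Bool.not_false, Bool.false_eq_true,
        if_false, if_true, List.map_cons, List.sum_cons]
      have := pot_mono_sinsert t f comp z
      omega
    · have hx' : x ∈ t := by
        rcases List.mem_cons.1 hx with h | h
        · exact absurd h.symm hz
        · exact h
      have ihh := ih hx'
      by_cases hzc : z ∈ comp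
      · have h1 : ((sinsert x comp).contains z) = true := by
          simp only [List.contains_iff_mem, mem_sinsert]; tauto
        have h2 : (comp.contains z) = true := by
          simp only [List.contains_iff_mem]; exact hzc
        simp only [List.filter_cons, h1, h2, Bool.not_true, Bool.false_eq_true, if_false]
        exact ihh
      · have h1 : ((sinsert x comp).contains z) = false := by
          simp only [Bool.eq_false_iff, ne_eq, List.contains_iff_mem, mem_sinsert]
          intro hc
          rcases hc with h | h
          · exact hz h
          · exact hzc h
        have h2 : (comp.contains z) = false := by
          simp only [Bool.eq_false_iff, ne_eq, List.contains_iff_mem]; exact hzc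
        simp only [List.filter_cons, h1, h2, Bool.not_false, if_true]
        simp only [List.map_cons, List.sum_cons]
        omega

-- the DFS while-loop of B: pop, mark, push neighbours (list reversed: Python pops the END)
def pvDfs (adj : PySem.Dict Int (List Int)) (comp : List Int) (stack : List Int) : List Int :=
  match stack with
  | [] => comp
  | x :: rest =>
    if h : comp.contains x then pvDfs adj comp rest
    else pvDfs adj (sinsert x comp) ((adj.getD x []).reverse ++ rest)
termination_by pvPot adj comp + stack.length
decreasing_by
  · simp only [List.length_cons]; omega
  · have hxc : ¬ x ∈ comp := by simpa [List.contains_iff_mem] using h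
    simp only [List.length_append, List.length_reverse, List.length_cons]
    by_cases hk : x ∈ adj.keys
    · have h2 := pot_sinsert adj.keys (fun y => ((adj.getD y []).length + 1)) comp x hk hxc
      simp only [] at h2
      unfold pvPot
      omega
    · have h0 : adj.getD x [] = [] := by
        apply PySem.Dict.getD_of_not_contains
        simp only [Bool.eq_false_iff, ne_eq]
        intro hc
        exact hk ((PySem.Dict.contains_iff_mem_keys adj x).1 hc)
      have hmono := pot_mono_sinsert adj.keys (fun y => ((adj.getD y []).length + 1)) comp x
      rw [h0]
      unfold pvPot
      simp only [List.length_nil]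
      omega

def clustering_group_alt (pairs : List (String × List (List Int))) : List (List Int) :=
  let edges := ((pairs.map (fun kv => kv.2)).flatten).map (fun p => p.take 2)
  let adj := edges.foldl pvAdjStep PySem.Dict.empty
  (edges.foldl (fun (s : List (List Int) × List Int) e =>
    match e with
    | [] => s
    | a :: _ =>
      if s.2.contains a then s
      else
        let comp := pvDfs adj [] [a]
        (s.1 ++ [comp], sunion s.2 comp)) ([], [])).1

-- ===== PRECONDITION & SPEC =====
-- On inputs whose FIRST flattened pair is the empty list, A emits an empty set as the first
-- cluster (an accident of its subset test against the still-empty cluster list; later empty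
-- pairs are silently dropped), while B never emits empty clusters because an empty pair
-- connects no elements; dropping the empty cluster is the intended clustering behaviour.
-- the first id-pair the input presents, scanning the association list key by key
def pvFirstPair? : List (String × List (List Int)) → Option (List Int)
  | [] => none
  | (_, []) :: rest => pvFirstPair? rest
  | (_, p :: _) :: _ => some p

def D_clustering_group (pairs : List (String × List (List Int))) : Prop :=
  pvFirstPair? pairs = some ([] : List Int)
instance (pairs : List (String × List (List Int))) : Decidable (D_clustering_group pairs) := by unfold D_clustering_group; infer_instance

def Spec_clustering_group (pairs : List (String × List (List Int))) (out : List (List Int)) : Prop := ¬ D_clustering_group pairs → out = clustering_group_alt pairs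
instance (pairs : List (String × List (List Int))) (out : List (List Int)) : Decidable (Spec_clustering_group pairs out) := by unfold Spec_clustering_group; infer_instance

def pvDiffWitness_clustering_group : (List (String × List (List Int))) := [("k", [[]])]
def pvDiffWitnessOut_clustering_group : (List (List Int)) × (List (List Int)) := ([[]], [])

-- ===== CLAIM (what is proved, stated in full; the proofs are below) =====
def Claim_unchanged_clustering_group : Prop := ∀ (pairs : List (String × List (List Int))), Dom_clustering_group pairs → Spec_clustering_group pairs (clustering_group pairs)
def Claim_changed_clustering_group : Prop := Dom_clustering_group (pvDiffWitness_clustering_group) ∧ D_clustering_group (pvDiffWitness_clustering_group) ∧ clustering_group (pvDiffWitness_clustering_group) = pvDiffWitnessOut_clustering_group.1 ∧ clustering_group_alt (pvDiffWitness_clustering_group) = pvDiffWitnessOut_clustering_group.2 ∧ pvDiffWitnessOut_clustering_group.1 ≠ pvDiffWitnessOut_clustering_group.2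
def Claim_exact_clustering_group : Prop := ∀ (pairs : List (String × List (List Int))), Dom_clustering_group pairs → D_clustering_group pairs → clustering_group pairs ≠ clustering_group_alt pairs

-- ===== LEMMAS AND PROOFS =====

-- sorted-set representation basics
theorem sorted_sinsert {x : Int} {l : List Int} (h : l.Pairwise (· < ·)) :
    (sinsert x l).Pairwise (· < ·) := by
  induction l with
  | nil => simp [sinsert]
  | cons z t ih =>
    rcases List.pairwise_cons.1 h with ⟨hz, ht⟩
    simp only [sinsert]
    split_ifs with h1 h2
    · exact List.pairwise_cons.2 ⟨by
        intro y hy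
        rcases List.mem_cons.1 hy with rfl | hy
        · exact h1
        · exact lt_trans h1 (hz y hy), h⟩
    · exact h
    · refine List.pairwise_cons.2 ⟨?_, ih ht⟩
      intro y hy
      rcases mem_sinsert.1 hy with rfl | hy
      · omega
      · exact hz y hy

theorem mem_sofList {y : Int} {l : List Int} : y ∈ sofList l ↔ y ∈ l := by
  induction l with
  | nil => simp [sofList]
  | cons z t ih => simp [sofList, List.foldr_cons, mem_sinsert]; unfold sofList at ih; rw [ih]

theorem sorted_sofList (l : List Int) : (sofList l).Pairwise (· < ·) := by
  induction l with
  | nil => simp [sofList]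
  | cons z t ih => exact sorted_sinsert ih

theorem mem_sunion {y : Int} {a b : List Int} : y ∈ sunion a b ↔ y ∈ a ∨ y ∈ b := by
  induction b with
  | nil => simp [sunion]
  | cons z t ih =>
    simp only [sunion, List.foldr_cons, mem_sinsert]
    unfold sunion at ih
    rw [ih]
    simp [List.mem_cons]
    tauto

theorem sorted_sunion {a b : List Int} (ha : a.Pairwise (· < ·)) :
    (sunion a b).Pairwise (· < ·) := by
  induction b with
  | nil => exact ha
  | cons z t ih => exact sorted_sinsert ih

theorem nodup_of_sorted {l : List Int} (h : l.Pairwise (· < ·)) : l.Nodup :=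
  h.imp ne_of_lt

theorem length_le_of_nodup_subset {l m : List Int} (h1 : l.Nodup) (h2 : l ⊆ m) :
    l.length ≤ m.length := by
  classical
  calc l.length = l.toFinset.card := (List.toFinset_card_of_nodup h1).symm
  _ ≤ m.toFinset.card := Finset.card_le_card (fun x hx => by
      simp only [List.mem_toFinset] at *; exact h2 hx)
  _ ≤ m.length := m.toFinset_card_le

theorem sset_eq {a b : List Int} (ha : a.Pairwise (· < ·)) (hb : b.Pairwise (· < ·))
    (h : ∀ y, y ∈ a ↔ y ∈ b) : a = b := by
  exact ((List.perm_ext_iff_of_nodup (nodup_of_sorted ha) (nodup_of_sorted hb)).2 h).eq_of_pairwise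
    (fun x y _ _ h1 h2 => absurd (lt_trans h1 h2) (lt_irrefl x)) ha hb

theorem ssubset_iff {a b : List Int} : ssubset a b = true ↔ ∀ x ∈ a, x ∈ b := by
  simp [ssubset, List.all_eq_true, List.contains_iff_mem]

theorem sdisjoint_iff {a b : List Int} : sdisjoint a b = true ↔ ∀ x ∈ a, ¬ x ∈ b := by
  simp [sdisjoint, List.all_eq_true, List.contains_iff_mem]

-- the connectivity relation of the pair graph
def EAdj (ES : List (List Int)) (x y : Int) : Prop := ∃ e ∈ ES, x ∈ e ∧ y ∈ e

def Conn (ES : List (List Int)) (a x : Int) : Prop := Relation.ReflTransGen (EAdj ES) a x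

-- ---- A-side: one scan pass ----
theorem scanStep_mem {s : List Int × Bool} {q : List Int} {x : Int} (h : x ∈ s.1) :
    x ∈ (pvScanStep s q).1 := by
  unfold pvScanStep
  split_ifs <;> simp_all [mem_sunion]

theorem scan_mem {es : List (List Int)} {s : List Int × Bool} {x : Int} (h : x ∈ s.1) :
    x ∈ (es.foldl pvScanStep s).1 := by
  induction es generalizing s with
  | nil => exact h
  | cons q t ih => exact ih (scanStep_mem h)

theorem scanStep_sorted {s : List Int × Bool} {q : List Int} (h : s.1.Pairwise (· < ·)) :
    (pvScanStep s q).1.Pairwise (· < ·) := by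
  unfold pvScanStep
  split_ifs <;> first | exact h | exact sorted_sunion h

theorem scan_sorted {es : List (List Int)} {s : List Int × Bool} (h : s.1.Pairwise (· < ·)) :
    (es.foldl pvScanStep s).1.Pairwise (· < ·) := by
  induction es generalizing s with
  | nil => exact h
  | cons q t ih => exact ih (scanStep_sorted h)

-- generic preservation: any property closed along intersecting scanned sets is preserved
theorem scan_pres (P : Int → Prop) (es : List (List Int)) (s : List Int × Bool)
    (HQ : ∀ q ∈ es, ∀ z x, z ∈ q → x ∈ q → P z → P x)
    (h : ∀ x ∈ s.1, P x) : ∀ x ∈ (es.foldl pvScanStep s).1, P x := by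
  induction es generalizing s with
  | nil => exact h
  | cons q t ih =>
    have hstep : ∀ x ∈ (pvScanStep s q).1, P x := by
      intro x hx
      unfold pvScanStep at hx
      split_ifs at hx with h1 h2
      · exact h x hx
      · rcases mem_sunion.1 hx with hx | hx
        · exact h x hx
        · simp only [Bool.not_eq_true'] at h2
          rw [Bool.eq_false_iff] at h2
          have : ∃ z ∈ s.1, z ∈ q := by
            by_contra hc
            push_neg at hc
            exact h2 (sdisjoint_iff.2 hc)
          rcases this with ⟨z, hz1, hz2⟩
          exact HQ q (List.mem_cons_self) z x hz2 hx (h z hz1)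
      · exact h x hx
    exact ih _ (fun q' hq' => HQ q' (List.mem_cons_of_mem _ hq')) hstep

theorem scan_flag_mono {es : List (List Int)} {s : List Int × Bool} (h : s.2 = true) :
    (es.foldl pvScanStep s).2 = true := by
  induction es generalizing s with
  | nil => exact h
  | cons q t ih =>
    refine ih ?_
    unfold pvScanStep
    split_ifs <;> simp_all

theorem scan_false {es : List (List Int)} {s : List Int × Bool}
    (h : (es.foldl pvScanStep s).2 = false) :
    (es.foldl pvScanStep s).1 = s.1 ∧
      ∀ q ∈ es, ssubset q s.1 = true ∨ sdisjoint s.1 q = true := by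
  induction es generalizing s with
  | nil => exact ⟨rfl, by simp⟩
  | cons q t ih =>
    simp only [List.foldl_cons] at h ⊢
    have hstep : pvScanStep s q = s ∧ (ssubset q s.1 = true ∨ sdisjoint s.1 q = true) := by
      unfold pvScanStep
      split_ifs with h1 h2
      · exact ⟨rfl, Or.inl h1⟩
      · exfalso
        have : ((t.foldl pvScanStep (sunion s.1 q, true)).2) = true := scan_flag_mono rfl
        rw [show t.foldl pvScanStep (pvScanStep s q) = t.foldl pvScanStep (sunion s.1 q, true) by
          unfold pvScanStep; rw [if_neg h1, if_pos h2]] at h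
        rw [h] at this
        exact Bool.false_ne_true this
      · simp only [Bool.not_eq_true', Bool.not_eq_false] at h2
        exact ⟨rfl, Or.inr h2⟩
    rw [hstep.1] at h ⊢
    rcases ih h with ⟨h3, h4⟩
    exact ⟨h3, fun q' hq' => by
      rcases List.mem_cons.1 hq' with rfl | hq'
      · exact hstep.2
      · exact h4 q' hq'⟩

theorem scan_grow {es : List (List Int)} {s : List Int × Bool} (h0 : s.2 = false)
    (h : (es.foldl pvScanStep s).2 = true) :
    ∃ x, x ∈ (es.foldl pvScanStep s).1 ∧ ¬ x ∈ s.1 := by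
  induction es generalizing s with
  | nil => rw [List.foldl_nil] at h; rw [h0] at h; exact absurd h Bool.false_ne_true
  | cons q t ih =>
    simp only [List.foldl_cons] at h ⊢
    by_cases h1 : ssubset q s.1 = true
    · have : pvScanStep s q = s := by unfold pvScanStep; rw [if_pos h1]
      rw [this] at h ⊢
      exact ih h0 h
    · by_cases h2 : sdisjoint s.1 q = true
      · have : pvScanStep s q = s := by
          unfold pvScanStep; rw [if_neg h1]; simp [h2]
        rw [this] at h ⊢
        exact ih h0 h
      · have hst : pvScanStep s q = (sunion s.1 q, true) := by
          unfold pvScanStep; rw [if_neg h1]; simp [Bool.eq_false_iff.2 h2]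
        rw [hst]
        have : ∃ x ∈ q, ¬ x ∈ s.1 := by
          by_contra hc
          push_neg at hc
          exact h1 (ssubset_iff.2 hc)
        rcases this with ⟨x, hx1, hx2⟩
        exact ⟨x, scan_mem (by simp [mem_sunion, hx1]), hx2⟩

-- ---- A-side: the closure loop ----
theorem close_mem {f : Nat} {p : List Int} {es : List (List Int)} {x : Int} (h : x ∈ p) :
    x ∈ pvClose f p es := by
  induction f generalizing p with
  | zero => exact h
  | succ n ih =>
    unfold pvClose
    simp only []
    split_ifs with h1
    · exact ih (scan_mem h)
    · exact scan_mem h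

theorem close_sorted {f : Nat} {p : List Int} {es : List (List Int)}
    (h : p.Pairwise (· < ·)) : (pvClose f p es).Pairwise (· < ·) := by
  induction f generalizing p with
  | zero => exact h
  | succ n ih =>
    unfold pvClose
    simp only []
    split_ifs with h1
    · exact ih (scan_sorted h)
    · exact scan_sorted h

theorem close_pres (P : Int → Prop) (f : Nat) (p : List Int) (es : List (List Int))
    (HQ : ∀ q ∈ es, ∀ z x, z ∈ q → x ∈ q → P z → P x)
    (h : ∀ x ∈ p, P x) : ∀ x ∈ pvClose f p es, P x := by
  induction f generalizing p with
  | zero => exact h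
  | succ n ih =>
    unfold pvClose
    simp only []
    split_ifs with h1
    · exact ih _ (scan_pres P es (p, false) HQ h)
    · exact scan_pres P es (p, false) HQ h

theorem close_stable (f : Nat) (p : List Int) (es : List (List Int))
    (hs : p.Pairwise (· < ·)) (hU : ∀ x ∈ p, x ∈ es.flatten)
    (hf : es.flatten.length + 1 ≤ f + p.length) :
    ∀ q ∈ es, ssubset q (pvClose f p es) = true ∨ sdisjoint (pvClose f p es) q = true := by
  induction f generalizing p with
  | zero =>
    exfalso
    have := length_le_of_nodup_subset (nodup_of_sorted hs) (fun x hx => hU x hx)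
    omega
  | succ n ih =>
    unfold pvClose pvScan
    simp only []
    split_ifs with h1
    · -- a productive scan: the state strictly grew
      rcases scan_grow rfl h1 with ⟨x, hx1, hx2⟩
      have hsub : ∀ y ∈ (es.foldl pvScanStep (p, false)).1, y ∈ es.flatten := by
        refine scan_pres _ es (p, false) ?_ hU
        intro q hq z y _ hy _
        exact List.mem_flatten.2 ⟨q, hq, hy⟩
      have hsort : ((es.foldl pvScanStep (p, false)).1).Pairwise (· < ·) := scan_sorted hs
      have hlen : p.length < ((es.foldl pvScanStep (p, false)).1).length := by
        have hpx : (x :: p).Nodup := by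
          refine List.nodup_cons.2 ⟨hx2, nodup_of_sorted hs⟩
        have : (x :: p) ⊆ (es.foldl pvScanStep (p, false)).1 := by
          intro y hy
          rcases List.mem_cons.1 hy with rfl | hy
          · exact hx1
          · exact scan_mem hy
        have := length_le_of_nodup_subset hpx this
        simpa using this
      exact ih _ hsort hsub (by omega)
    · -- a fixpoint: stability holds for the returned state
      have hfix := scan_false (Bool.eq_false_iff.2 (fun hc => absurd hc h1))
      rw [hfix.1]
      exact hfix.2

-- ---- B-side: the adjacency dict ----
theorem adjInner_mono (e : List Int) (l : List Int) (d : PySem.Dict Int (List Int))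
    {x y : Int} (h : y ∈ d.getD x []) :
    y ∈ (l.foldl (fun d a => d.insert a (d.getD a [] ++ e.filter (fun b => b != a))) d).getD x [] := by
  induction l generalizing d with
  | nil => exact h
  | cons a t ih =>
    refine ih _ ?_
    rw [PySem.Dict.getD_insert]
    split_ifs with h1
    · subst h1; exact List.mem_append_left _ h
    · exact h

theorem adjStep_mono {d : PySem.Dict Int (List Int)} {e : List Int} {x y : Int}
    (h : y ∈ d.getD x []) : y ∈ (pvAdjStep d e).getD x [] := adjInner_mono e e d h

theorem adj_mono {es : List (List Int)} {d : PySem.Dict Int (List Int)} {x y : Int}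
    (h : y ∈ d.getD x []) : y ∈ (es.foldl pvAdjStep d).getD x [] := by
  induction es generalizing d with
  | nil => exact h
  | cons e t ih => exact ih (adjStep_mono h)

theorem adjInner_complete (e : List Int) (l : List Int) (d : PySem.Dict Int (List Int))
    {a b : Int} (ha : a ∈ l) (hb : b ∈ e) (hne : b ≠ a) :
    b ∈ (l.foldl (fun d a => d.insert a (d.getD a [] ++ e.filter (fun b => b != a))) d).getD a [] := by
  induction l generalizing d with
  | nil => simp at ha
  | cons c t ih =>
    by_cases hc : a = c
    · subst hc
      refine adjInner_mono e t _ ?_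
      rw [PySem.Dict.getD_insert, if_pos rfl]
      refine List.mem_append_right _ (List.mem_filter.2 ⟨hb, ?_⟩)
      simp [hne]
    · rcases List.mem_cons.1 ha with h | h
      · exact absurd h hc
      · exact ih _ h

theorem adjStep_complete {d : PySem.Dict Int (List Int)} {e : List Int} {a b : Int}
    (ha : a ∈ e) (hb : b ∈ e) (hne : b ≠ a) : b ∈ (pvAdjStep d e).getD a [] :=
  adjInner_complete e e d ha hb hne

theorem adj_complete {a b : Int} (hne : b ≠ a) :
    ∀ (es : List (List Int)) (d : PySem.Dict Int (List Int)) (e : List Int),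
    e ∈ es → a ∈ e → b ∈ e → b ∈ (es.foldl pvAdjStep d).getD a [] := by
  intro es
  induction es with
  | nil => intro d e he _ _; simp at he
  | cons e' t ih =>
    intro d e he ha hb
    simp only [List.foldl_cons]
    rcases List.mem_cons.1 he with rfl | hmem
    · exact adj_mono (adjStep_complete ha hb hne)
    · exact ih _ e hmem ha hb

theorem adjInner_sound (e : List Int) (l : List Int) (d : PySem.Dict Int (List Int))
    (P : Int → Int → Prop) (hl : ∀ a ∈ l, a ∈ e)
    (hd : ∀ x y, y ∈ d.getD x [] → P x y)
    (he : ∀ x y, x ∈ e → y ∈ e → P x y) :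
    ∀ x y, y ∈ (l.foldl (fun d a => d.insert a (d.getD a [] ++ e.filter (fun b => b != a))) d).getD x [] → P x y := by
  induction l generalizing d with
  | nil => exact hd
  | cons a t ih =>
    refine ih _ (fun a' ha' => hl a' (List.mem_cons_of_mem _ ha')) ?_
    intro x y hy
    rw [PySem.Dict.getD_insert] at hy
    split_ifs at hy with h1
    · rcases List.mem_append.1 hy with hy | hy
      · subst h1; exact hd x y hy
      · subst h1
        exact he x y (hl x List.mem_cons_self) (List.mem_filter.1 hy).1
    · exact hd x y hy

theorem adj_sound_aux (ES : List (List Int)) (es : List (List Int)) :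
    ∀ (d : PySem.Dict Int (List Int)),
    (∀ e ∈ es, e ∈ ES) → (∀ x y : Int, y ∈ d.getD x [] → EAdj ES x y) →
    ∀ x y : Int, y ∈ (es.foldl pvAdjStep d).getD x [] → EAdj ES x y := by
  induction es with
  | nil => intro d _ hd; exact hd
  | cons e t ih =>
    intro d hsub hd
    refine ih _ (fun e' he' => hsub e' (List.mem_cons_of_mem _ he')) ?_
    intro x y hy
    exact adjInner_sound e e d (EAdj ES) (fun a ha => ha) hd
      (fun x y hx hy' => ⟨e, hsub e List.mem_cons_self, hx, hy'⟩) x y hy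

theorem adj_sound (ES : List (List Int)) {x y : Int}
    (h : y ∈ (ES.foldl pvAdjStep PySem.Dict.empty).getD x []) : EAdj ES x y := by
  refine adj_sound_aux ES ES PySem.Dict.empty (fun e he => he) ?_ x y h
  intro x y hy
  rw [PySem.Dict.getD_empty] at hy
  simp at hy

-- ---- B-side: the DFS loop ----
theorem dfs_sorted (adj : PySem.Dict Int (List Int)) (comp stack : List Int) :
    comp.Pairwise (· < ·) → (pvDfs adj comp stack).Pairwise (· < ·) := by
  induction comp, stack using pvDfs.induct adj with
  | case1 comp => intro h; simpa [pvDfs]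
  | case2 comp y t hc ih =>
    intro h
    rw [pvDfs, dif_pos hc]
    exact ih h
  | case3 comp y t hc ih =>
    intro h
    rw [pvDfs, dif_neg hc]
    exact ih (sorted_sinsert h)

theorem dfs_supset (adj : PySem.Dict Int (List Int)) (comp stack : List Int) :
    ∀ x, (x ∈ comp ∨ x ∈ stack) → x ∈ pvDfs adj comp stack := by
  induction comp, stack using pvDfs.induct adj with
  | case1 comp =>
    intro x hx
    rw [pvDfs]
    rcases hx with hx | hx
    · exact hx
    · simp at hx
  | case2 comp y t hc ih =>
    intro x hx
    rw [pvDfs, dif_pos hc]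
    rcases hx with hx | hx
    · exact ih x (Or.inl hx)
    · rcases List.mem_cons.1 hx with rfl | hx
      · exact ih x (Or.inl (List.contains_iff_mem.1 hc))
      · exact ih x (Or.inr hx)
  | case3 comp y t hc ih =>
    intro x hx
    rw [pvDfs, dif_neg hc]
    rcases hx with hx | hx
    · exact ih x (Or.inl (mem_sinsert.2 (Or.inr hx)))
    · rcases List.mem_cons.1 hx with rfl | hx
      · exact ih x (Or.inl (mem_sinsert.2 (Or.inl rfl)))
      · exact ih x (Or.inr (List.mem_append_right _ hx))

theorem dfs_pres (adj : PySem.Dict Int (List Int)) (P : Int → Prop)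
    (HP : ∀ x y : Int, y ∈ adj.getD x [] → P x → P y) (comp stack : List Int) :
    (∀ x ∈ comp, P x) → (∀ x ∈ stack, P x) → ∀ z ∈ pvDfs adj comp stack, P z := by
  induction comp, stack using pvDfs.induct adj with
  | case1 comp =>
    intro h1 _ z hz
    rw [pvDfs] at hz
    exact h1 z hz
  | case2 comp y t hc ih =>
    intro h1 h2 z hz
    rw [pvDfs, dif_pos hc] at hz
    exact ih h1 (fun x hx => h2 x (List.mem_cons_of_mem _ hx)) z hz
  | case3 comp y t hc ih =>
    intro h1 h2 z hz
    rw [pvDfs, dif_neg hc] at hz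
    have hy : P y := h2 y (List.mem_cons_self)
    refine ih ?_ ?_ z hz
    · intro x hx
      rcases mem_sinsert.1 hx with rfl | hx
      · exact hy
      · exact h1 x hx
    · intro x hx
      rcases List.mem_append.1 hx with hx | hx
      · exact HP y x (List.mem_reverse.1 hx) hy
      · exact h2 x (List.mem_cons_of_mem _ hx)

theorem dfs_closed (adj : PySem.Dict Int (List Int)) (comp stack : List Int) :
    (∀ z ∈ comp, ∀ y ∈ adj.getD z [], y ∈ comp ∨ y ∈ stack) →
    ∀ z ∈ pvDfs adj comp stack, ∀ y ∈ adj.getD z [], y ∈ pvDfs adj comp stack := by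
  induction comp, stack using pvDfs.induct adj with
  | case1 comp =>
    intro hinv z hz y hy
    rw [pvDfs] at hz ⊢
    rcases hinv z hz y hy with h | h
    · exact h
    · simp at h
  | case2 comp x t hc ih =>
    intro hinv z hz y hy
    rw [pvDfs, dif_pos hc] at hz ⊢
    refine ih ?_ z hz y hy
    intro z' hz' y' hy'
    rcases hinv z' hz' y' hy' with h | h
    · exact Or.inl h
    · rcases List.mem_cons.1 h with rfl | h
      · exact Or.inl (List.contains_iff_mem.1 hc)
      · exact Or.inr h
  | case3 comp x t hc ih =>
    intro hinv z hz y hy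
    rw [pvDfs, dif_neg hc] at hz ⊢
    refine ih ?_ z hz y hy
    intro z' hz' y' hy'
    rcases mem_sinsert.1 hz' with rfl | hz'
    · exact Or.inr (List.mem_append_left _ (List.mem_reverse.2 hy'))
    · rcases hinv z' hz' y' hy' with h | h
      · exact Or.inl (mem_sinsert.2 (Or.inr h))
      · rcases List.mem_cons.1 h with rfl | h
        · exact Or.inl (mem_sinsert.2 (Or.inl rfl))
        · exact Or.inr (List.mem_append_right _ h)

-- ---- characterizations: both closure computations give the connected component ----
theorem close_char (ES : List (List Int)) (e : List Int) (he : e ∈ ES) (a : Int)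
    (t : List Int) (hea : e = a :: t) (fuel : Nat)
    (hf : ((ES.map sofList).flatten).length + 1 ≤ fuel + (sofList e).length) :
    ∀ x, x ∈ pvClose fuel (sofList e) (ES.map sofList) ↔ Conn ES a x := by
  have ha : a ∈ e := by rw [hea]; exact List.mem_cons_self
  have hU : ∀ x ∈ sofList e, x ∈ ((ES.map sofList).flatten) :=
    fun x hx => List.mem_flatten.2 ⟨sofList e, List.mem_map_of_mem he, hx⟩
  have hstab := close_stable fuel (sofList e) (ES.map sofList) (sorted_sofList e) hU hf
  intro x
  constructor
  · refine close_pres (Conn ES a) fuel (sofList e) (ES.map sofList) ?_ ?_ x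
    · intro q hq z w hz hw hcz
      rcases List.mem_map.1 hq with ⟨e', he', rfl⟩
      exact hcz.tail ⟨e', he', mem_sofList.1 hz, mem_sofList.1 hw⟩
    · intro y hy
      exact Relation.ReflTransGen.single ⟨e, he, ha, mem_sofList.1 hy⟩
  · intro hconn
    induction hconn with
    | refl => exact close_mem (mem_sofList.2 ha)
    | tail hcz hadj ih =>
      rcases hadj with ⟨e', he', hz, hx⟩
      rcases hstab (sofList e') (List.mem_map_of_mem he') with hsub | hdisj
      · exact ssubset_iff.1 hsub _ (mem_sofList.2 hx)
      · exact absurd (mem_sofList.2 hz) (sdisjoint_iff.1 hdisj _ ih)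

theorem dfs_char (ES : List (List Int)) (a : Int) :
    ∀ x, x ∈ pvDfs (ES.foldl pvAdjStep PySem.Dict.empty) [] [a] ↔ Conn ES a x := by
  intro x
  constructor
  · refine dfs_pres _ (Conn ES a) ?_ [] [a] (by simp) ?_ x
    · intro z y hy hcz
      exact hcz.tail (adj_sound ES hy)
    · intro y hy
      rcases List.mem_singleton.1 hy with rfl
      exact Relation.ReflTransGen.refl
  · intro hconn
    have hclosed := dfs_closed (ES.foldl pvAdjStep PySem.Dict.empty) [] [a] (by simp)
    induction hconn with
    | refl => exact dfs_supset _ [] [a] a (Or.inr (List.mem_singleton.2 rfl))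
    | @tail b c hcz hadj ih =>
      rcases hadj with ⟨e', he', hz, hx⟩
      by_cases hxz : c = b
      · exact hxz ▸ ih
      · exact hclosed _ ih c (adj_complete hxz ES PySem.Dict.empty e' he' hz hx)

theorem comp_eq (ES : List (List Int)) (e : List Int)
    (he : e ∈ ES) (a : Int) (t : List Int) (hea : e = a :: t) (fuel : Nat)
    (hf : ((ES.map sofList).flatten).length + 1 ≤ fuel + (sofList e).length) :
    pvClose fuel (sofList e) (ES.map sofList) =
      pvDfs (ES.foldl pvAdjStep PySem.Dict.empty) [] [a] := by
  refine sset_eq (close_sorted (sorted_sofList e)) (dfs_sorted _ _ _ List.Pairwise.nil) ?_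
  intro y
  rw [close_char ES e he a t hea fuel hf, dfs_char ES a]

-- ---- the empty pair-set: A's closure loop returns it unchanged ----
theorem scan_nil_state (es : List (List Int)) : es.foldl pvScanStep ([], false) = ([], false) := by
  induction es with
  | nil => rfl
  | cons q t ih =>
    have hstep : pvScanStep (([] : List Int), false) q = ([], false) := by
      unfold pvScanStep
      have hd : sdisjoint [] q = true := rfl
      split_ifs with h1 h2
      · rfl
      · rw [hd] at h2; simp at h2
      · rfl
    rw [List.foldl_cons, hstep, ih]

theorem pvClose_nil (f : Nat) (es : List (List Int)) : pvClose f [] es = [] := by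
  cases f with
  | zero => rfl
  | succ n =>
    unfold pvClose pvScan
    rw [scan_nil_state]
    rfl

theorem pvFirstPair?_eq (pairs : List (String × List (List Int))) :
    pvFirstPair? pairs = ((pairs.map (fun kv => kv.2)).flatten).head? := by
  induction pairs with
  | nil => rfl
  | cons kv rest ih =>
    rcases kv with ⟨k, vs⟩
    cases vs with
    | nil => simpa [pvFirstPair?] using ih
    | cons p t => simp [pvFirstPair?]

-- named step functions (proof-side names for the two folds)
def stepA (ES : List (List Int)) (cl : List (List Int)) (e : List Int) : List (List Int) :=
  if cl.any (fun c => ssubset (sofList e) c) then cl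
  else cl ++ [pvClose (((ES.map sofList).map List.length).sum + 1) (sofList e) (ES.map sofList)]

def stepB (ES : List (List Int)) (s : List (List Int) × List Int) (e : List Int) :
    List (List Int) × List Int :=
  match e with
  | [] => s
  | a :: _ =>
    if s.2.contains a then s
    else
      let comp := pvDfs (ES.foldl pvAdjStep PySem.Dict.empty) [] [a]
      (s.1 ++ [comp], sunion s.2 comp)

theorem stepA_eq (ES : List (List Int)) (cl : List (List Int)) (e : List Int) :
    stepA ES cl e = if cl.any (fun c => ssubset (sofList e) c) then cl
      else cl ++ [pvClose (((ES.map sofList).map List.length).sum + 1) (sofList e)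
        (ES.map sofList)] := rfl

theorem stepB_nil (ES : List (List Int)) (s : List (List Int) × List Int) :
    stepB ES s [] = s := rfl

theorem stepB_cons (ES : List (List Int)) (s : List (List Int) × List Int)
    (a : Int) (t : List Int) :
    stepB ES s (a :: t) = if s.2.contains a then s
      else (s.1 ++ [pvDfs (ES.foldl pvAdjStep PySem.Dict.empty) [] [a]],
        sunion s.2 (pvDfs (ES.foldl pvAdjStep PySem.Dict.empty) [] [a])) := rfl

-- the two ports as folds of the named step functions
def pvEdges (pairs : List (String × List (List Int))) : List (List Int) :=
  ((pairs.map (fun kv => kv.2)).flatten).map (fun p => p.take 2)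

theorem A_as_fold (pairs : List (String × List (List Int))) :
    clustering_group pairs = (pvEdges pairs).foldl (stepA (pvEdges pairs)) [] := by
  simp only [clustering_group, pvEdges]
  have hmm : ((pairs.map (fun kv => kv.2)).flatten).map (fun p => sofList (p.take 2)) =
      (((pairs.map (fun kv => kv.2)).flatten).map (fun p => p.take 2)).map sofList := by
    rw [List.map_map]
    rfl
  rw [hmm, List.foldl_map]
  rfl

theorem B_as_fold (pairs : List (String × List (List Int))) :
    clustering_group_alt pairs = ((pvEdges pairs).foldl (stepB (pvEdges pairs)) ([], [])).1 := rfl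

-- ---- the joint induction over the edge list ----
theorem main_fold (ES : List (List Int)) :
    ∀ (rest : List (List Int)) (LA : List (List Int)) (vis : List Int),
    (∀ e ∈ rest, e ∈ ES) →
    (∀ x : Int, x ∈ vis ↔ ∃ c ∈ LA, x ∈ c) →
    (∀ c ∈ LA, ∀ q ∈ ES.map sofList, ssubset q c = true ∨ sdisjoint c q = true) →
    (LA = [] → rest.head? ≠ some []) →
    rest.foldl (stepA ES) LA = (rest.foldl (stepB ES) (LA, vis)).1 := by
  intro rest
  induction rest with
  | nil =>
    intro LA vis _ _ _ _
    rfl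
  | cons e rest' ih =>
    intro LA vis hsub hvis hstab hne
    simp only [List.foldl_cons]
    rw [stepA_eq]
    have hsub' : ∀ e' ∈ rest', e' ∈ ES := fun e' he' => hsub e' (List.mem_cons_of_mem _ he')
    cases e with
    | nil =>
      have hLA : LA ≠ [] := by
        intro h
        exact hne h rfl
      rcases List.exists_mem_of_ne_nil LA hLA with ⟨c, hc⟩
      have hany : LA.any (fun c => ssubset (sofList []) c) = true :=
        List.any_eq_true.2 ⟨c, hc, rfl⟩
      rw [if_pos hany, stepB_nil]
      exact ih LA vis hsub' hvis hstab (fun h => absurd h hLA)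
    | cons a t =>
      rw [stepB_cons]
      have heES : (a :: t) ∈ ES := hsub _ (List.mem_cons_self)
      have ha : a ∈ sofList (a :: t) := mem_sofList.2 List.mem_cons_self
      have hiff : (LA.any (fun c => ssubset (sofList (a :: t)) c) = true) ↔
          (vis.contains a = true) := by
        constructor
        · intro h
          rcases List.any_eq_true.1 h with ⟨c, hc, hcs⟩
          exact List.contains_iff_mem.2 ((hvis a).2 ⟨c, hc, ssubset_iff.1 hcs a ha⟩)
        · intro h
          rcases (hvis a).1 (List.contains_iff_mem.1 h) with ⟨c, hc, hac⟩
          rcases hstab c hc (sofList (a :: t)) (List.mem_map_of_mem heES) with hs | hd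
          · exact List.any_eq_true.2 ⟨c, hc, hs⟩
          · exact absurd ha (sdisjoint_iff.1 hd a hac)
      by_cases hskip : vis.contains a = true
      · have hany := hiff.2 hskip
        rw [if_pos hany, if_pos hskip]
        have hLAne : LA ≠ [] := by
          intro h
          rcases (hvis a).1 (List.contains_iff_mem.1 hskip) with ⟨c, hc, _⟩
          rw [h] at hc
          simp at hc
        exact ih LA vis hsub' hvis hstab (fun h => absurd h hLAne)
      · have hnA : ¬ (LA.any (fun c => ssubset (sofList (a :: t)) c)) = true :=
          fun h => hskip (hiff.1 h)
        rw [if_neg hnA, if_neg hskip]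
        have hf : ((ES.map sofList).flatten).length + 1 ≤
            (((ES.map sofList).map List.length).sum + 1) + (sofList (a :: t)).length := by
          rw [List.length_flatten]
          omega
        have hcomp := comp_eq ES (a :: t) heES a t rfl _ hf
        rw [hcomp]
        set cB := pvDfs (ES.foldl pvAdjStep PySem.Dict.empty) [] [a] with hcB
        have hstabA : ∀ q ∈ ES.map sofList,
            ssubset q cB = true ∨ sdisjoint cB q = true := by
          rw [← hcomp]
          exact close_stable _ _ _ (sorted_sofList (a :: t))
            (fun x hx => List.mem_flatten.2 ⟨sofList (a :: t), List.mem_map_of_mem heES, hx⟩) hf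
        refine ih (LA ++ [cB]) (sunion vis cB) hsub' ?_ ?_ ?_
        · intro x
          rw [mem_sunion, hvis]
          constructor
          · rintro (⟨c, hc, hxc⟩ | hx)
            · exact ⟨c, List.mem_append_left _ hc, hxc⟩
            · exact ⟨cB, List.mem_append_right _ (List.mem_singleton.2 rfl), hx⟩
          · rintro ⟨c, hc, hxc⟩
            rcases List.mem_append.1 hc with hc | hc
            · exact Or.inl ⟨c, hc, hxc⟩
            · rcases List.mem_singleton.1 hc with rfl
              exact Or.inr hxc
        · intro c hc q hq
          rcases List.mem_append.1 hc with hc | hc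
          · exact hstab c hc q hq
          · rcases List.mem_singleton.1 hc with rfl
            exact hstabA q hq
        · intro h
          simp at h

-- ---- lemmas for the tight claim ----
theorem stepA_sub (ES : List (List Int)) :
    ∀ (l : List (List Int)) (cl : List (List Int)), ∀ c ∈ cl, c ∈ l.foldl (stepA ES) cl := by
  intro l
  induction l with
  | nil => intro cl c hc; exact hc
  | cons e t ih =>
    intro cl c hc
    simp only [List.foldl_cons]
    refine ih _ c ?_
    rw [stepA_eq]
    split_ifs with h1
    · exact hc
    · exact List.mem_append_left _ hc

theorem stepB_ne_nil (ES : List (List Int)) :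
    ∀ (l : List (List Int)) (s : List (List Int) × List Int),
    (∀ c ∈ s.1, c ≠ []) → ∀ c ∈ (l.foldl (stepB ES) s).1, c ≠ [] := by
  intro l
  induction l with
  | nil => intro s h; exact h
  | cons e t ih =>
    intro s h
    simp only [List.foldl_cons]
    refine ih _ ?_
    cases e with
    | nil => rw [stepB_nil]; exact h
    | cons a t' =>
      rw [stepB_cons]
      split_ifs with h1
      · exact h
      · intro c hc
        rcases List.mem_append.1 hc with hc | hc
        · exact h c hc
        · rcases List.mem_singleton.1 hc with rfl
          exact List.ne_nil_of_mem (dfs_supset _ [] [a] a (Or.inr (List.mem_singleton.2 rfl)))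

-- ===== VERDICT (by name: the statements are the Claim_ definitions above) =====
theorem clustering_group_spec : Claim_unchanged_clustering_group := by
  intro pairs _ hnd
  rw [A_as_fold, B_as_fold]
  refine main_fold (pvEdges pairs) (pvEdges pairs) [] [] (fun e he => he) (by simp) (by simp) ?_
  intro _ hh
  apply hnd
  unfold D_clustering_group
  rw [pvFirstPair?_eq]
  unfold pvEdges at hh
  rw [List.head?_map] at hh
  cases hfl : ((pairs.map (fun kv => kv.2)).flatten) with
  | nil => rw [hfl] at hh; simp at hh
  | cons p t =>
    rw [hfl] at hh
    simp only [Option.map_some, List.head?_cons, Option.some.injEq] at hh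
    have hp : p = [] := by
      have := List.take_eq_nil_iff.1 hh
      tauto
    rw [hp]
    rfl

theorem clustering_group_changed : Claim_changed_clustering_group := by
  unfold Claim_changed_clustering_group; decide

theorem clustering_group_tight : Claim_exact_clustering_group := by
  intro pairs _ hd heq
  rw [A_as_fold, B_as_fold] at heq
  unfold D_clustering_group at hd
  rw [pvFirstPair?_eq] at hd
  have hE : ∃ t, pvEdges pairs = [] :: t := by
    unfold pvEdges
    cases hfl : ((pairs.map (fun kv => kv.2)).flatten) with
    | nil => rw [hfl] at hd; simp at hd
    | cons p t =>
      rw [hfl] at hd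
      simp only [List.head?_cons, Option.some.injEq] at hd
      exact ⟨t.map (fun p => p.take 2), by rw [hd]; rfl⟩
  rcases hE with ⟨t, hEe⟩
  have hmemA : ([] : List Int) ∈ (pvEdges pairs).foldl (stepA (pvEdges pairs)) [] := by
    rw [hEe]
    simp only [List.foldl_cons]
    refine stepA_sub _ t _ ([] : List Int) ?_
    rw [stepA_eq]
    have hany : ([] : List (List Int)).any (fun c => ssubset (sofList []) c) = false := rfl
    rw [hany]
    simp only [Bool.false_eq_true, if_false, List.nil_append]
    have : sofList ([] : List Int) = [] := rfl
    rw [this, pvClose_nil]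
    exact List.mem_singleton.2 rfl
  rw [heq] at hmemA
  exact stepB_ne_nil (pvEdges pairs) (pvEdges pairs) ([], []) (by simp) [] hmemA rfl
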